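-- pv_equiv track=rewrite | github.com/felipe-mello-dos-reis/python | soma_hipotenusas.py | e_hipotenusa
-- ===== SOURCE A (Python) =====
-- def e_hipotenusa(n):
--     a = 1
--     while a < n:
--         b = 1
--         while b < n:
--             if n**2 == a**2 + b**2:
--                 return True
--             b+=1
--         a+=1
--     return False
-- ===== SOURCE B (Python) =====
-- def e_hipotenusa(n):
--     a = 1
--     while a < n:
--         r = n * n - a * a
--         # integer square root of r by binary search
--         lo = 0
--         hi = r
--         while lo < hi:
--             mid = (lo + hi + 1) // 2
--             if mid * mid <= r:
--                 lo = mid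
--             else:
--                 hi = mid - 1
--         if lo * lo == r:
--             return True
--         a += 1
--     return False
-- ===== Notes on version B (the rewrite author's own statement) =====
-- stated objective: faster
-- what changed: The inner linear scan over b is replaced by a perfect-square test on n*n - a*a using an integer square root computed by binary search, giving one pass over a instead of nested passes.
import Mathlib
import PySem

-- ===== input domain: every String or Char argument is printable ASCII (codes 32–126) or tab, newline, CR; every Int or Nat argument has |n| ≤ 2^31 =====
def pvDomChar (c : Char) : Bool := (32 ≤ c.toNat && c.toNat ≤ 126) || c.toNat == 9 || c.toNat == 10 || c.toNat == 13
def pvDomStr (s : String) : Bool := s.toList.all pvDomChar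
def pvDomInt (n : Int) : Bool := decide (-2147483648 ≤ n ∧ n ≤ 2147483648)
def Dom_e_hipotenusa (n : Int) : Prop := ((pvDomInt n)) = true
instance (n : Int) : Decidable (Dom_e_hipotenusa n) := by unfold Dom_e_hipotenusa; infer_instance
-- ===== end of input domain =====

-- B replaces A's inner linear scan over b by a binary-search integer square root
-- and a perfect-square test on n*n - a*a (faster in a timing run).

-- ===== PORT A =====
-- inner 'while b < n' loop of A
def eHipInner (n a b : Int) : Bool :=
  if _h : b < n then
    if n ^ 2 = a ^ 2 + b ^ 2 then true
    else eHipInner n a (b + 1)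
  else false
termination_by (n - b).toNat
decreasing_by omega

-- outer 'while a < n' loop of A
def eHipOuter (n a : Int) : Bool :=
  if _h : a < n then
    if eHipInner n a 1 then true else eHipOuter n (a + 1)
  else false
termination_by (n - a).toNat
decreasing_by omega

def e_hipotenusa (n : Int) : Bool := eHipOuter n 1

-- ===== PORT B =====
-- B's binary-search integer square root loop ('while lo < hi')
def pvIsqrtLoop (r lo hi : Int) : Int :=
  if _h : lo < hi then
    if PySem.Int.floordiv (lo + hi + 1) 2 * PySem.Int.floordiv (lo + hi + 1) 2 ≤ r then
      pvIsqrtLoop r (PySem.Int.floordiv (lo + hi + 1) 2) hi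
    else
      pvIsqrtLoop r lo (PySem.Int.floordiv (lo + hi + 1) 2 - 1)
  else lo
termination_by (hi - lo).toNat
decreasing_by
  all_goals
    have hb := PySem.Int.floordiv_two_mid_bounds (show (lo + 1 : Int) ≤ hi by omega)
    rw [show (lo + hi + 1 : Int) = (lo + 1) + hi from by ring] at *
    omega

-- B's outer 'while a < n' loop
def eHipAltOuter (n a : Int) : Bool :=
  if _h : a < n then
    let r := n * n - a * a
    let s := pvIsqrtLoop r 0 r
    if s * s = r then true else eHipAltOuter n (a + 1)
  else false
termination_by (n - a).toNat
decreasing_by omega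

def e_hipotenusa_alt (n : Int) : Bool := eHipAltOuter n 1

-- ===== PRECONDITION & SPEC =====
def Spec_e_hipotenusa (n : Int) (out : Bool) : Prop := out = e_hipotenusa_alt n
instance (n : Int) (out : Bool) : Decidable (Spec_e_hipotenusa n out) := by unfold Spec_e_hipotenusa; infer_instance

-- ===== CLAIM (what is proved, stated in full; the proofs are below) =====
def Claim_equal_e_hipotenusa : Prop := ∀ (n : Int), Dom_e_hipotenusa n → Spec_e_hipotenusa n (e_hipotenusa n)

-- ===== LEMMAS AND PROOFS =====

-- binary search soundness: the result s satisfies lo ≤ s, s*s ≤ r < (s+1)*(s+1)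
lemma pvIsqrtLoop_sound (k : Nat) : ∀ (r lo hi : Int), (hi - lo).toNat ≤ k →
    lo ≤ hi → lo * lo ≤ r → r < (hi + 1) * (hi + 1) →
    lo ≤ pvIsqrtLoop r lo hi ∧
    pvIsqrtLoop r lo hi * pvIsqrtLoop r lo hi ≤ r ∧
    r < (pvIsqrtLoop r lo hi + 1) * (pvIsqrtLoop r lo hi + 1) := by
  induction k with
  | zero =>
    intro r lo hi hk hle hlo hhi
    have : lo = hi := by omega
    rw [pvIsqrtLoop]
    simp only [show ¬ lo < hi by omega, dif_neg, not_false_iff]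
    subst this
    exact ⟨le_refl _, hlo, hhi⟩
  | succ k ih =>
    intro r lo hi hk hle hlo hhi
    rw [pvIsqrtLoop]
    by_cases h : lo < hi
    · have hb := PySem.Int.floordiv_two_mid_bounds (show (lo + 1 : Int) ≤ hi by omega)
      rw [show (lo + hi + 1 : Int) = (lo + 1) + hi from by ring] at *
      set mid := PySem.Int.floordiv ((lo + 1) + hi) 2 with hmid
      simp only [dif_pos h]
      by_cases hm : mid * mid ≤ r
      · simp only [if_pos hm]
        have := ih r mid hi (by omega) (by omega) hm hhi
        exact ⟨by omega, this.2.1, this.2.2⟩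
      · simp only [if_neg hm]
        have hlt : r < ((mid - 1) + 1) * ((mid - 1) + 1) := by
          have : (mid - 1 + 1 : Int) = mid := by ring
          rw [this]; omega
        have := ih r lo (mid - 1) (by omega) (by omega) hlo hlt
        exact this
    · simp only [dif_neg h]
      have : lo = hi := by omega
      subst this
      exact ⟨le_refl _, hlo, hhi⟩

-- A's inner loop searches for c with b ≤ c < n and n² = a² + c²
lemma eHipInner_iff (k : Nat) : ∀ (n a b : Int), (n - b).toNat ≤ k →
    (eHipInner n a b = true ↔ ∃ c : Int, b ≤ c ∧ c < n ∧ n ^ 2 = a ^ 2 + c ^ 2) := by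
  induction k with
  | zero =>
    intro n a b hk
    rw [eHipInner]
    simp only [show ¬ b < n by omega, dif_neg, not_false_iff]
    constructor
    · intro h; exact absurd h (by simp)
    · rintro ⟨c, h1, h2, _⟩; omega
  | succ k ih =>
    intro n a b hk
    rw [eHipInner]
    by_cases h : b < n
    · simp only [dif_pos h]
      by_cases he : n ^ 2 = a ^ 2 + b ^ 2
      · simp only [if_pos he]
        constructor
        · intro _; exact ⟨b, le_refl _, h, he⟩
        · intro _; trivial
      · simp only [if_neg he]
        rw [ih n a (b + 1) (by omega)]
        constructor
        · rintro ⟨c, h1, h2, h3⟩; exact ⟨c, by omega, h2, h3⟩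
        · rintro ⟨c, h1, h2, h3⟩
          refine ⟨c, ?_, h2, h3⟩
          rcases eq_or_lt_of_le h1 with heq | hlt
          · exfalso; exact he (heq ▸ h3)
          · omega
    · simp only [dif_neg h]
      constructor
      · intro hf; exact absurd hf (by simp)
      · rintro ⟨c, h1, h2, _⟩; omega

-- per-a bridge: for 1 ≤ a < n, A's inner scan succeeds iff n*n - a*a is a perfect square
lemma inner_eq_square (n a : Int) (ha1 : 1 ≤ a) (han : a < n) :
    (eHipInner n a 1 = true) ↔
    pvIsqrtLoop (n * n - a * a) 0 (n * n - a * a) * pvIsqrtLoop (n * n - a * a) 0 (n * n - a * a)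
      = n * n - a * a := by
  set r := n * n - a * a with hr
  have hn2 : 2 ≤ n := by omega
  have hrge : 2 * n - 1 ≤ r := by
    have : a * a ≤ (n - 1) * (n - 1) := by nlinarith
    rw [hr]; nlinarith
  have hr0 : 0 ≤ r := by omega
  have hs := pvIsqrtLoop_sound ((r - 0).toNat) r 0 r (le_refl _) hr0 (by omega)
    (by nlinarith)
  set s := pvIsqrtLoop r 0 r with hsdef
  obtain ⟨hs0, hs1, hs2⟩ := hs
  rw [eHipInner_iff ((n - 1).toNat) n a 1 (le_refl _)]
  constructor
  · rintro ⟨c, hc1, hcn, hce⟩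
    have hcc : c * c = r := by rw [hr]; nlinarith [sq_nonneg c, hce]
    have : s = c := by nlinarith
    rw [this, hcc]
  · intro hsq
    refine ⟨s, ?_, ?_, ?_⟩
    · nlinarith
    · nlinarith
    · have : n ^ 2 = n * n := by ring
      have h2 : a ^ 2 = a * a := by ring
      have h3 : s ^ 2 = s * s := by ring
      rw [this, h2, h3]; omega

-- the two outer loops agree
lemma outer_eq (k : Nat) : ∀ (n a : Int), 1 ≤ a → (n - a).toNat ≤ k →
    eHipOuter n a = eHipAltOuter n a := by
  induction k with
  | zero =>
    intro n a _ hk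
    rw [eHipOuter, eHipAltOuter]
    simp only [show ¬ a < n by omega, dif_neg, not_false_iff]
  | succ k ih =>
    intro n a ha hk
    rw [eHipOuter, eHipAltOuter]
    by_cases h : a < n
    · simp only [dif_pos h]
      have hbr := inner_eq_square n a ha h
      by_cases hc : pvIsqrtLoop (n * n - a * a) 0 (n * n - a * a) *
          pvIsqrtLoop (n * n - a * a) 0 (n * n - a * a) = n * n - a * a
      · have : eHipInner n a 1 = true := hbr.mpr hc
        simp only [this, if_pos hc, if_true]
      · have : eHipInner n a 1 = false := by
          cases hi : eHipInner n a 1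
          · rfl
          · exact absurd (hbr.mp hi) hc
        simp only [this, if_neg hc, Bool.false_eq_true, if_false]
        exact ih n (a + 1) (by omega) (by omega)
    · simp only [dif_neg h]

-- ===== VERDICT (by name: the statement is the Claim_ definition above) =====
theorem e_hipotenusa_spec : Claim_equal_e_hipotenusa := by
  intro n _
  unfold Spec_e_hipotenusa e_hipotenusa e_hipotenusa_alt
  exact outer_eq ((n - 1).toNat) n 1 (le_refl _) (le_refl _)
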